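-- pv_equiv track=rewrite | github.com/darrens2k/leetcode | Miscellaineous/Problem 1/problem 3.py | solution
-- ===== SOURCE A (Python) =====
-- def solution(N):
--
--     # convert from binary to decimal
--     dec = 0
--     counter = len(N) - 1
--     i = 0
--     while counter >= 0:
--         if N[counter] != "0":
--             dec += 2**i
--         counter -= 1
--         i += 1
--
--     # convert to base 6
--     ans = ""
--     while dec > 0:
--         ans = str(dec % 6) + ans
--         dec = dec // 6
--     return ans
-- ===== SOURCE B (Python) =====
-- def solution(N):
--     # Horner's rule left-to-right: no reversed index, no 2**i powers.
--     dec = 0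
--     for c in N:
--         dec = dec * 2 + (0 if c == "0" else 1)
--     # collect base-6 digits least-significant-first, then join reversed
--     digits = []
--     while dec > 0:
--         digits.append(str(dec % 6))
--         dec //= 6
--     return "".join(reversed(digits))
-- ===== Notes on version B (the rewrite author's own statement) =====
-- stated objective: simpler
-- what changed: Binary-to-decimal is done by Horner's rule in a single left-to-right pass (no reversed index, no 2**i power), and the base-6 digits are collected least-significant-first in a list and joined reversed instead of repeated string prepending.
import Mathlib
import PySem

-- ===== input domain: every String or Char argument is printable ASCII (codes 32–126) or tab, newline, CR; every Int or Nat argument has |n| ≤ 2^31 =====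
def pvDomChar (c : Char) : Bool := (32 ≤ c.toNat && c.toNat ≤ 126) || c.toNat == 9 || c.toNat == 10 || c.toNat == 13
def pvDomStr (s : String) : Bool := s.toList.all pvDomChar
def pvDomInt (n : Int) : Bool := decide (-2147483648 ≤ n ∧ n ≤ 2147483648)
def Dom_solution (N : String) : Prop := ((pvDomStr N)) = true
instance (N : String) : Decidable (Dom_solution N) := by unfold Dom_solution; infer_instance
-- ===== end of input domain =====

-- B replaces A's reversed-index 2**i binary evaluation by a single left-to-right Horner pass,
-- and builds the base-6 string from a digit list joined reversed instead of string prepending (objective: simpler).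

-- ===== PORT A =====
-- A's first while loop: counter runs len(N)-1 .. 0, i runs upward; N[counter] is always in
-- range when counter ≥ 0 here, so the `.getD '0'` default of pyGet? is never used.
def pvA_binLoop (l : List Char) (dec : Int) (counter : Int) (i : Nat) : Int :=
  if _h : counter ≥ 0 then
    pvA_binLoop l
      (if ((PySem.List.pyGet? l counter).getD '0') ≠ '0' then dec + 2 ^ i else dec)
      (counter - 1) (i + 1)
  else dec
termination_by (counter + 1).toNat
decreasing_by omega

-- A's second while loop: ans = str(dec % 6) + ans; dec = dec // 6  (over List Char)
def pvA_b6 (dec : Int) (ans : List Char) : List Char :=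
  if _h : dec > 0 then
    pvA_b6 (PySem.Int.floordiv dec 6) (PySem.Int.toChars (PySem.Int.mod dec 6) ++ ans)
  else ans
termination_by dec.toNat
decreasing_by
  have := PySem.Int.floordiv_eq_ediv_of_pos (a := dec) (b := 6) (by omega)
  rw [this]; omega

def solution (N : String) : String :=
  let dec := pvA_binLoop N.toList 0 (PySem.Str.len N - 1) 0
  String.mk (pvA_b6 dec [])

-- ===== PORT B =====
-- Horner's rule: for c in N: dec = dec*2 + (0 if c == "0" else 1)
def pvB_horner (l : List Char) : Int :=
  l.foldl (fun d c => d * 2 + (if c = '0' then 0 else 1)) 0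

-- digits.append(str(dec % 6)); dec //= 6
def pvB_digits (d : Int) (digits : List (List Char)) : List (List Char) :=
  if _h : d > 0 then
    pvB_digits (PySem.Int.floordiv d 6) (digits ++ [PySem.Int.toChars (PySem.Int.mod d 6)])
  else digits
termination_by d.toNat
decreasing_by
  have := PySem.Int.floordiv_eq_ediv_of_pos (a := d) (b := 6) (by omega)
  rw [this]; omega

-- "".join(reversed(digits))
def solution_alt (N : String) : String :=
  String.mk ((pvB_digits (pvB_horner N.toList) []).reverse.flatten)

-- ===== PRECONDITION & SPEC =====
def Spec_solution (N : String) (out : String) : Prop := out = solution_alt N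
instance (N : String) (out : String) : Decidable (Spec_solution N out) := by unfold Spec_solution; infer_instance

-- ===== CLAIM (what is proved, stated in full; the proofs are below) =====
def Claim_equal_solution : Prop := ∀ (N : String), Dom_solution N → Spec_solution N (solution N)

-- ===== LEMMAS AND PROOFS =====

-- Horner value of an extra character on the right
theorem pvB_horner_concat (l : List Char) (c : Char) :
    pvB_horner (l ++ [c]) = pvB_horner l * 2 + (if c = '0' then 0 else 1) := by
  simp [pvB_horner]

-- A's downward-index loop computes dec + 2^i * (Horner value of the first k characters)
theorem pvA_binLoop_eq (l : List Char) (k : Nat) (hk : k ≤ l.length)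
    (dec : Int) (i : Nat) :
    pvA_binLoop l dec ((k : Int) - 1) i = dec + 2 ^ i * pvB_horner (l.take k) := by
  induction k generalizing dec i with
  | zero => rw [pvA_binLoop]; simp [pvB_horner]
  | succ k ih =>
      have hlt : k < l.length := by omega
      have hc : ((k + 1 : Nat) : Int) - 1 = (k : Int) := by push_cast; ring
      rw [pvA_binLoop, hc, dif_pos (show (k : Int) ≥ 0 by omega)]
      rw [show PySem.List.pyGet? l (k : Int) = some l[k] from by
        simp [List.getElem?_eq_getElem hlt]]
      rw [show (k : Int) - 1 = (k : Int) - 1 from rfl, ih (by omega)]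
      have htake : l.take (k + 1) = l.take k ++ [l[k]] := by
        rw [List.take_add_one, List.getElem?_eq_getElem hlt]; rfl
      rw [htake, pvB_horner_concat]
      by_cases hz : l[k] = '0' <;> simp [hz] <;> ring

-- B's digit-list loop: the accumulator only collects on the right
theorem pvB_digits_acc (d : Int) (acc : List (List Char)) :
    pvB_digits d acc = acc ++ pvB_digits d [] := by
  induction hn : d.toNat using Nat.strong_induction_on generalizing d acc with
  | _ n ih =>
    by_cases h : d > 0
    · have hlt : (PySem.Int.floordiv d 6).toNat < n := by
        have := PySem.Int.floordiv_eq_ediv_of_pos (a := d) (b := 6) (by omega)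
        rw [this]; omega
      rw [pvB_digits, dif_pos h]
      conv_rhs => rw [pvB_digits, dif_pos h]
      rw [List.nil_append,
          ih _ hlt _ (acc ++ [PySem.Int.toChars (PySem.Int.mod d 6)]) rfl,
          ih _ hlt _ ([PySem.Int.toChars (PySem.Int.mod d 6)]) rfl]
      simp
    · rw [pvB_digits, dif_neg h]
      conv_rhs => rw [pvB_digits, dif_neg h]
      simp

-- A's prepend loop equals B's digit list reversed and flattened, followed by ans
theorem pvA_b6_eq (d : Int) (ans : List Char) :
    pvA_b6 d ans = (pvB_digits d []).reverse.flatten ++ ans := by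
  induction hn : d.toNat using Nat.strong_induction_on generalizing d ans with
  | _ n ih =>
    by_cases h : d > 0
    · have hlt : (PySem.Int.floordiv d 6).toNat < n := by
        have := PySem.Int.floordiv_eq_ediv_of_pos (a := d) (b := 6) (by omega)
        rw [this]; omega
      rw [pvA_b6, dif_pos h]
      conv_rhs => rw [pvB_digits, dif_pos h, pvB_digits_acc]
      rw [ih _ hlt _ _ rfl]
      simp
    · rw [pvA_b6, dif_neg h]
      conv_rhs => rw [pvB_digits, dif_neg h]
      simp

-- ===== VERDICT (by name: the statement is the Claim_ definition above) =====
theorem solution_spec : Claim_equal_solution := by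
  intro N _
  show solution N = solution_alt N
  unfold solution solution_alt
  have hlen : PySem.Str.len N - 1 = (N.toList.length : Int) - 1 := by
    simp [PySem.Str.len_eq]
  rw [hlen, pvA_binLoop_eq N.toList N.toList.length le_rfl 0 0]
  simp only [pvA_b6_eq, List.append_nil, pow_zero, one_mul, zero_add]
  rw [show List.take N.toList.length N.toList = N.toList from List.take_length]
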